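-- pv_equiv track=rewrite | github.com/Blsnnf/Agent_coder | src/agents/architect_agent.py | _suggest_patterns
-- ===== SOURCE A (Python) =====
-- from typing import Dict, List, Optional, Any
--
-- def _suggest_patterns(requirement: str) -> List[str]:
--     """建议设计模式"""
--     patterns = []
--     req_lower = requirement.lower()
--
--     if "user" in req_lower and "auth" in req_lower:
--         patterns.append("Strategy (Authentication)")
--     if "notify" in req_lower or "subscribe" in req_lower:
--         patterns.append("Observer")
--     if "payment" in req_lower or "order" in req_lower:
--         patterns.append("Factory + State Machine")
--     if any(kw in req_lower for kw in ["cache", "memory"]):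
--         patterns.append("Proxy + Cache")
--
--     return patterns or ["MVC", "Repository"]
-- ===== SOURCE B (Python) =====
-- from typing import Dict, List, Optional, Any
--
-- # Staged rewrite: first a single left-to-right scan of the lowered text collects,
-- # position by position, which keywords occur (a naive multi-pattern matcher);
-- # then a second stage maps the hit set to pattern labels.
-- _KEYWORDS = ["user", "auth", "notify", "subscribe", "payment", "order", "cache", "memory"]
--
-- def _suggest_patterns(requirement: str) -> List[str]:
--     text = requirement.lower()
--     hits: List[str] = []
--     for i in range(len(text) + 1):
--         for kw in _KEYWORDS:
--             if kw not in hits and text.startswith(kw, i):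
--                 hits.append(kw)
--     patterns: List[str] = []
--     if "user" in hits and "auth" in hits:
--         patterns.append("Strategy (Authentication)")
--     if "notify" in hits or "subscribe" in hits:
--         patterns.append("Observer")
--     if "payment" in hits or "order" in hits:
--         patterns.append("Factory + State Machine")
--     if "cache" in hits or "memory" in hits:
--         patterns.append("Proxy + Cache")
--     return patterns or ["MVC", "Repository"]
-- ===== Notes on version B (the rewrite author's own statement) =====
-- stated objective: alternative
-- what changed: Instead of one substring search per rule, B runs a single position-by-position scan of the lowered text that collects the set of matched keywords (a naive multi-pattern matcher), then derives the pattern labels from that hit set in a second stage.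
import Mathlib
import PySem

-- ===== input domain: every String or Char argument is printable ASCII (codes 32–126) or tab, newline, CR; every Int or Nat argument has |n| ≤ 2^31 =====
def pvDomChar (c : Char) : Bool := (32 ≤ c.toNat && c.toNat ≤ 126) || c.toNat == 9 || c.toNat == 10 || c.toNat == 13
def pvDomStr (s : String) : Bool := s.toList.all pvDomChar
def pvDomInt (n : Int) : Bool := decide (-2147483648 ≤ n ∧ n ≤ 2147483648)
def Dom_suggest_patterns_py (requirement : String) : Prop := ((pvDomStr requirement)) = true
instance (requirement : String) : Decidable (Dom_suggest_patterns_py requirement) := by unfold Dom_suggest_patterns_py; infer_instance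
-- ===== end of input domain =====

-- B replaces A's per-rule substring tests by a single position scan that collects the set of
-- matched keywords, then maps the hit set to labels (alternative decomposition; same cost).

-- ===== PORT A =====
def suggest_patterns_py (requirement : String) : List String :=
  let req_lower := PySem.Str.lower requirement
  let patterns : List String := []
  let patterns := if PySem.Str.isIn "user" req_lower && PySem.Str.isIn "auth" req_lower
    then patterns ++ ["Strategy (Authentication)"] else patterns
  let patterns := if PySem.Str.isIn "notify" req_lower || PySem.Str.isIn "subscribe" req_lower
    then patterns ++ ["Observer"] else patterns
  let patterns := if PySem.Str.isIn "payment" req_lower || PySem.Str.isIn "order" req_lower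
    then patterns ++ ["Factory + State Machine"] else patterns
  let patterns := if ["cache", "memory"].any (fun kw => PySem.Str.isIn kw req_lower)
    then patterns ++ ["Proxy + Cache"] else patterns
  if patterns = [] then ["MVC", "Repository"] else patterns

-- ===== PORT B =====
def pvKeywords : List String :=
  ["user", "auth", "notify", "subscribe", "payment", "order", "cache", "memory"]

-- the inner keyword pass at one text position (text.startswith(kw, i) = prefix of the drop)
def pvScanPos (text : List Char) (hits : List String) (i : Nat) : List String :=
  pvKeywords.foldl (fun hits kw =>
    if !hits.contains kw && PySem.Chars.startswith (text.drop i) kw.toList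
    then hits ++ [kw] else hits) hits

def suggest_patterns_py_alt (requirement : String) : List String :=
  let text := (PySem.Str.lower requirement).toList
  let hits := (List.range (text.length + 1)).foldl (pvScanPos text) []
  let patterns : List String := []
  let patterns := if hits.contains "user" && hits.contains "auth"
    then patterns ++ ["Strategy (Authentication)"] else patterns
  let patterns := if hits.contains "notify" || hits.contains "subscribe"
    then patterns ++ ["Observer"] else patterns
  let patterns := if hits.contains "payment" || hits.contains "order"
    then patterns ++ ["Factory + State Machine"] else patterns
  let patterns := if hits.contains "cache" || hits.contains "memory"
    then patterns ++ ["Proxy + Cache"] else patterns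
  if patterns = [] then ["MVC", "Repository"] else patterns

-- ===== PRECONDITION & SPEC =====
def Spec_suggest_patterns_py (requirement : String) (out : List String) : Prop := out = suggest_patterns_py_alt requirement
instance (requirement : String) (out : List String) : Decidable (Spec_suggest_patterns_py requirement out) := by unfold Spec_suggest_patterns_py; infer_instance

-- ===== CLAIM (what is proved, stated in full; the proofs are below) =====
def Claim_equal_suggest_patterns_py : Prop := ∀ (requirement : String), Dom_suggest_patterns_py requirement → Spec_suggest_patterns_py requirement (suggest_patterns_py requirement)

-- ===== LEMMAS AND PROOFS =====

-- membership after one if-guarded append step of the inner pass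
theorem contains_step (d : List Char) (hits : List String) (k kw : String) :
    ((if (!hits.contains k && PySem.Chars.startswith d k.toList) = true then hits ++ [k] else hits).contains kw)
    = (hits.contains kw || (kw == k && PySem.Chars.startswith d kw.toList)) := by
  by_cases heq : kw = k
  · subst heq
    by_cases hc : kw ∈ hits
    · simp [hc]
    · by_cases hsw : PySem.Chars.startswith d kw.toList = true
      · simp [hc, hsw, List.mem_append]
      · simp [hc, hsw]
  · by_cases hc : kw ∈ hits <;> split_ifs <;> simp_all [List.mem_append]

-- membership after the inner keyword pass
theorem contains_inner (d : List Char) (kws : List String) (hits : List String) (kw : String) :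
    ((kws.foldl (fun hits k =>
        if !hits.contains k && PySem.Chars.startswith d k.toList
        then hits ++ [k] else hits) hits).contains kw)
    = (hits.contains kw || (kws.contains kw && PySem.Chars.startswith d kw.toList)) := by
  induction kws generalizing hits with
  | nil => simp
  | cons k kws ih =>
    rw [List.foldl_cons, ih, contains_step]
    by_cases heq : kw = k <;>
      cases hsw : PySem.Chars.startswith d kw.toList <;>
      by_cases hc : kw ∈ hits <;> by_cases hks : kw ∈ kws <;>
      simp [heq, hc, hks, List.mem_cons]

theorem contains_pvScanPos (text : List Char) (hits : List String) (i : Nat) (kw : String) :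
    (pvScanPos text hits i).contains kw
    = (hits.contains kw || (pvKeywords.contains kw && PySem.Chars.startswith (text.drop i) kw.toList)) :=
  contains_inner _ _ _ _

-- membership after the whole scan
theorem contains_scan (text : List Char) (rs : List Nat) (hits : List String) (kw : String) :
    ((rs.foldl (pvScanPos text) hits).contains kw)
    = (hits.contains kw || (pvKeywords.contains kw && rs.any (fun i => PySem.Chars.startswith (text.drop i) kw.toList))) := by
  induction rs generalizing hits with
  | nil => simp
  | cons i rs ih =>
    simp only [List.foldl_cons, ih, contains_pvScanPos, List.any_cons]
    cases hits.contains kw <;> cases pvKeywords.contains kw <;>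
      cases PySem.Chars.startswith (text.drop i) kw.toList <;> simp

-- the scan finds exactly the keywords that occur as substrings
theorem contains_hits (text : List Char) (kw : String) (hkw : pvKeywords.contains kw = true)
    (hne : kw.toList ≠ []) :
    (((List.range (text.length + 1)).foldl (pvScanPos text) []).contains kw)
    = PySem.Chars.isIn kw.toList text := by
  rw [contains_scan]
  simp only [hkw, Bool.true_and, List.contains_nil, Bool.false_or]
  cases hin : PySem.Chars.isIn kw.toList text with
  | true =>
    obtain ⟨j, hj⟩ := (PySem.Chars.exists_prefix_drop_iff_isIn kw.toList text).mpr hin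
    have hjle : j ≤ text.length := by
      by_contra h
      have hd : text.drop j = [] := List.drop_eq_nil_of_le (by omega)
      rw [hd] at hj
      exact hne (List.prefix_nil.mp hj)
    simp only [List.any_eq_true]
    exact ⟨j, List.mem_range.mpr (by omega), (PySem.Chars.startswith_iff _ _).mpr hj⟩
  | false =>
    simp only [List.any_eq_false]
    intro i _ hsw
    have hT : PySem.Chars.isIn kw.toList text = true :=
      (PySem.Chars.exists_prefix_drop_iff_isIn kw.toList text).mp
        ⟨i, (PySem.Chars.startswith_iff _ _).mp hsw⟩
    rw [hT] at hin
    exact Bool.noConfusion hin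

-- ===== VERDICT (by name: the statement is the Claim_ definition above) =====
theorem suggest_patterns_py_spec : Claim_equal_suggest_patterns_py := by
  intro requirement _
  have h : ∀ kw : String, pvKeywords.contains kw = true → kw.toList ≠ [] →
      ((((List.range ((PySem.Str.lower requirement).toList.length + 1)).foldl
          (pvScanPos (PySem.Str.lower requirement).toList) []).contains kw))
      = PySem.Str.isIn kw (PySem.Str.lower requirement) := by
    intro kw hkw hne
    rw [contains_hits _ _ hkw hne]
    simp [PySem.Str.isIn]
  unfold Spec_suggest_patterns_py suggest_patterns_py suggest_patterns_py_alt
  simp only [h "user" (by decide) (by decide), h "auth" (by decide) (by decide),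
      h "notify" (by decide) (by decide), h "subscribe" (by decide) (by decide),
      h "payment" (by decide) (by decide), h "order" (by decide) (by decide),
      h "cache" (by decide) (by decide), h "memory" (by decide) (by decide),
      List.any_cons, List.any_nil, Bool.or_false]
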